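-- pv_equiv track=rewrite | github.com/hrushikeshrv/aoc | 2021/day15.py | augment_row
-- ===== SOURCE A (Python) =====
-- def augment_row(row):
--     row_len = int(len(row)/5)
--     augmentation_string = '0' * row_len + '1' * row_len + '2' * row_len + '3' * row_len + '4' * row_len
--     new_row = ''
--     for j in range(row_len*5):
--         _ = int(row[j]) + int(augmentation_string[j])
--         if _ >= 10:
--             _ -= 9
--         new_row += str(_)
--     return new_row
-- ===== SOURCE B (Python) =====
-- def _tile(row, n, seg):
--     out = []
--     for i in range(n):
--         v = int(row[seg * n + i]) + seg
--         if v >= 10: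
--             v -= 9
--         out.append(str(v))
--     return ''.join(out)
--
--
-- def augment_row(row):
--     n = len(row) // 5
--     return ''.join(_tile(row, n, seg) for seg in range(5))
-- ===== Notes on version B (the rewrite author's own statement) =====
-- stated objective: simpler
-- what changed: B drops A's precomputed augmentation lookup string and its single flat indexed pass, instead building five per-tile strings in a nested tiles-then-positions loop where the offset is the tile number itself, joined at the end.
import Mathlib
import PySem

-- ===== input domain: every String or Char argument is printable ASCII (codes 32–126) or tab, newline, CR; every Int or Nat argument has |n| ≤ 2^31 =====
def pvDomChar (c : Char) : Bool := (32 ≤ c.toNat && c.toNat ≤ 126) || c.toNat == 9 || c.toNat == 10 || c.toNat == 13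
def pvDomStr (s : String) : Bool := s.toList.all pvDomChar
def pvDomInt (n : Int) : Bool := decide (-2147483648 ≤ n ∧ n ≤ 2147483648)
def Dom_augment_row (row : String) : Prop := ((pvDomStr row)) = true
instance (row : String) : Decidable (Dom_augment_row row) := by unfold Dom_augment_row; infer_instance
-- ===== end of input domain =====

-- B replaces A's precomputed augmentation lookup string and flat indexed pass by a nested
-- tiles-then-positions loop (the offset IS the tile number), joining the five tile strings;
-- objective: simpler.

-- ===== PORT A =====
-- int(len(row)/5): float true division then int() truncation; for the nonnegative lengths of
-- Dom this is exactly floor division (exact below 2^52), ported as PySem.Int.floordiv.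
-- int(row[j]) / int(augmentation_string[j]): ofChars? is none on a non-digit char (ValueError,
-- excluded by Pre_); the .getD 0 is never reached inside Pre_ (indices are always in range).
def augment_row (row : String) : String :=
  let rowLen : Int := PySem.Int.floordiv (PySem.Str.len row) 5
  let augmentationString : List Char :=
    PySem.List.pyRepeat ['0'] rowLen ++ PySem.List.pyRepeat ['1'] rowLen ++
    PySem.List.pyRepeat ['2'] rowLen ++ PySem.List.pyRepeat ['3'] rowLen ++
    PySem.List.pyRepeat ['4'] rowLen
  let newRow : List Char :=
    (PySem.List.pyRange 0 (rowLen * 5) 1).foldl (fun acc j =>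
      let u : Int := (PySem.Int.ofChars? [PySem.List.pyGetD row.toList j ' ']).getD 0 +
                     (PySem.Int.ofChars? [PySem.List.pyGetD augmentationString j ' ']).getD 0
      let v : Int := if u ≥ 10 then u - 9 else u
      acc ++ (PySem.Int.toStr v).toList) []
  String.ofList newRow

-- ===== PORT B =====
-- _tile from Source B; the .getD 0 after ofChars? is as in port A (ValueError outside Pre_).
def tile_augment_row (row : String) (n : Int) (seg : Int) : List Char :=
  let out : List (List Char) :=
    (PySem.List.pyRange 0 n 1).foldl (fun out i =>
      let u : Int := (PySem.Int.ofChars? [PySem.List.pyGetD row.toList (seg * n + i) ' ']).getD 0 + seg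
      let v : Int := if u ≥ 10 then u - 9 else u
      out ++ [(PySem.Int.toStr v).toList]) []
  PySem.Chars.join [] out

-- len(row) // 5 on a nonnegative length = floordiv
def augment_row_alt (row : String) : String :=
  let n : Int := PySem.Int.floordiv (PySem.Str.len row) 5
  String.ofList (PySem.Chars.join []
    ((PySem.List.pyRange 0 5 1).map (fun seg => tile_augment_row row n seg)))

-- ===== PRECONDITION & SPEC =====
-- Python A raises ValueError as soon as int() meets a non-digit character among the first
-- 5*(len(row)//5) positions; Pre_ admits exactly the inputs where A returns.
def Pre_augment_row (row : String) : Prop :=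
  ((row.toList.take (5 * (row.toList.length / 5))).all PySem.Chars.isdigit) = true
instance (row : String) : Decidable (Pre_augment_row row) := by unfold Pre_augment_row; infer_instance

def pvWitness_augment_row : String := "1239876545"

def Spec_augment_row (row : String) (out : String) : Prop := out = augment_row_alt row
instance (row : String) (out : String) : Decidable (Spec_augment_row row out) := by unfold Spec_augment_row; infer_instance

-- ===== CLAIM (what is proved, stated in full; the proofs are below) =====
def Claim_equal_augment_row : Prop := ∀ (row : String), Dom_augment_row row → Pre_augment_row row → Spec_augment_row row (augment_row row)

-- ===== LEMMAS AND PROOFS =====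

-- ''.join is flatten
theorem pv_join_nil (parts : List (List Char)) : PySem.Chars.join [] parts = parts.flatten := by
  induction parts with
  | nil => rfl
  | cons p ps ih =>
      cases ps with
      | nil => simp [PySem.Chars.join, List.intercalate]
      | cons q qs =>
          simp [PySem.Chars.join, List.intercalate, List.intersperse] at ih ⊢
          simpa using ih

theorem pv_getD_rep_left (c : Char) (tail : List Char) (N k : Nat) (hk : k < N) :
    (List.replicate N c ++ tail).getD k ' ' = c := by
  rw [List.getD_eq_getElem?_getD, List.getElem?_append_left (by simpa using hk)]
  simp [hk]

theorem pv_getD_rep_skip (c : Char) (tail : List Char) (N m : Nat) :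
    (List.replicate N c ++ tail).getD (N + m) ' ' = tail.getD m ' ' := by
  rw [List.getD_eq_getElem?_getD, List.getElem?_append_right (by simp)]
  simp [List.getD_eq_getElem?_getD]

-- the augmentation string's character in tile seg is the digit seg
theorem pv_aug_getD (N seg k : Nat) (h5 : seg < 5) (hk : k < N) :
    (List.replicate N '0' ++ List.replicate N '1' ++ List.replicate N '2' ++
      List.replicate N '3' ++ List.replicate N '4').getD (seg * N + k) ' '
      = Char.ofNat (48 + seg) := by
  simp only [List.append_assoc]
  interval_cases seg
  · simpa using pv_getD_rep_left '0' _ N k hk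
  · rw [show 1 * N + k = N + k by ring, pv_getD_rep_skip]
    simpa using pv_getD_rep_left '1' _ N k hk
  · rw [show 2 * N + k = N + (N + k) by ring, pv_getD_rep_skip, pv_getD_rep_skip]
    simpa using pv_getD_rep_left '2' _ N k hk
  · rw [show 3 * N + k = N + (N + (N + k)) by ring, pv_getD_rep_skip, pv_getD_rep_skip,
        pv_getD_rep_skip]
    simpa using pv_getD_rep_left '3' _ N k hk
  · rw [show 4 * N + k = N + (N + (N + (N + k))) by ring, pv_getD_rep_skip, pv_getD_rep_skip,
        pv_getD_rep_skip, pv_getD_rep_skip]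
    have : (List.replicate N '4').getD k ' ' = '4' := by
      rw [List.getD_eq_getElem?_getD]; simp [hk]
    simpa using this


theorem pv_floordiv_len (row : String) :
    PySem.Int.floordiv (PySem.Str.len row) 5 = ((row.toList.length / 5 : Nat) : Int) := by
  simp [PySem.Str.len_eq, PySem.Int.floordiv]
  rw [Int.fdiv_eq_ediv]; simp

-- one flat pass over range(5*N) = five tile passes, glued
theorem pv_block (N s : Nat) (g : Int → List Char) (f : Int → List Char)
    (h : ∀ k : Nat, k < N → g ((s:Int) * N + k) = f k) :
    (PySem.List.pyRange ((s:Int)*N) ((s:Int)*N + N) 1).flatMap g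
      = ((PySem.List.pyRange 0 (N:Int) 1).map f).flatten := by
  rw [PySem.List.pyRange_one, PySem.List.pyRange_one]
  simp only [add_sub_cancel_left, sub_zero, Int.toNat_natCast, List.flatMap_map, List.map_map]
  rw [List.flatMap_def]
  apply congrArg List.flatten
  apply List.map_congr_left
  intro k hk
  simp only [Function.comp, zero_add]
  exact h k (List.mem_range.mp hk)

theorem pv_blocks (N : Nat) (g : Int → List Char) (f : Int → Int → List Char)
    (h : ∀ seg k : Nat, seg < 5 → k < N → g ((seg:Int) * N + k) = f seg k) :
    (PySem.List.pyRange 0 ((N:Int) * 5) 1).flatMap g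
      = ((PySem.List.pyRange 0 5 1).map (fun seg =>
          ((PySem.List.pyRange 0 (N:Int) 1).map (fun i => f seg i)).flatten)).flatten := by
  have b0 := pv_block N 0 g (f 0) (fun k hk => h 0 k (by omega) hk)
  have b1 := pv_block N 1 g (f 1) (fun k hk => h 1 k (by omega) hk)
  have b2 := pv_block N 2 g (f 2) (fun k hk => h 2 k (by omega) hk)
  have b3 := pv_block N 3 g (f 3) (fun k hk => h 3 k (by omega) hk)
  have b4 := pv_block N 4 g (f 4) (fun k hk => h 4 k (by omega) hk)
  push_cast at b0 b1 b2 b3 b4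
  rw [show ((N:Int)) * 5 = N+(N+(N+(N+N))) by ring]
  rw [PySem.List.pyRange_one_append 0 (N:Int) _ (by omega) (by omega)]
  rw [PySem.List.pyRange_one_append (N:Int) ((N:Int)+N) _ (by omega) (by omega)]
  rw [PySem.List.pyRange_one_append ((N:Int)+N) ((N:Int)+N+N) _ (by omega) (by omega)]
  rw [PySem.List.pyRange_one_append ((N:Int)+N+N) ((N:Int)+N+N+N) _ (by omega) (by omega)]
  simp only [List.flatMap_append]
  rw [show PySem.List.pyRange 0 5 1 = [0,1,2,3,4] from by decide]
  simp only [List.map_cons, List.map_nil, List.flatten_cons, List.flatten_nil, List.append_nil]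
  norm_num at b0 b1
  rw [show (2:Int) * (N:Int) = (N:Int)+N by ring] at b2
  rw [show (3:Int) * (N:Int) = (N:Int)+N+N by ring] at b3
  rw [show (4:Int) * (N:Int) = (N:Int)+N+N+N by ring] at b4
  rw [show (N:Int)+N+N+N+N = (N:Int)+(N+(N+(N+N))) by ring] at b4
  rw [b0, b1, b2, b3, b4]

-- ===== VERDICT (by name: the statement is the Claim_ definition above) =====
theorem augment_row_spec : Claim_equal_augment_row := by
  intro row hdom hpre
  unfold Spec_augment_row augment_row augment_row_alt tile_augment_row
  simp only [pv_floordiv_len, pv_join_nil, PySem.List.foldl_append_eq_flatMap,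
    ← List.map_eq_flatMap, List.nil_append, PySem.List.pyRepeat_singleton, Int.toNat_natCast]
  apply congrArg
  apply pv_blocks
  intro seg k h5 hk
  have hidx : ((seg:Int) * ((row.toList.length / 5 : Nat) : Int) + (k:Int))
      = ((seg * (row.toList.length / 5) + k : Nat) : Int) := by push_cast; ring
  rw [hidx, PySem.List.pyGetD_natCast, PySem.List.pyGetD_natCast,
      pv_aug_getD (row.toList.length / 5) seg k h5 hk]
  have hv : (PySem.Int.ofChars? [Char.ofNat (48 + seg)]).getD 0 = (seg : Int) := by
    interval_cases seg <;> decide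
  rw [hv]
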